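-- pv_equiv track=rewrite | github.com/slptongji/GERP | data_utils/prepare_dialogue_data.py | filter_sentence_length_peld
-- ===== SOURCE A (Python) =====
-- def is_valid_sen(data, min_len, max_len):
--     if (len(data) > min_len) and (len(data) <= max_len):
--         return True
--     else:
--         return False
--
-- def filter_sentence_length_peld(utt1_data, utt2_data, emo1_data,emo2_data,emo3_data,person_data, min_len, max_len):
--     new_utt1, new_utt2,new_utt3, new_emo1,new_emo2,new_emo3,new_person = [], [], [],[],[],[],[]
--     for utt1, utt2, emo1,emo2,emo3,person in zip(utt1_data, utt2_data, emo1_data,emo2_data,emo3_data,person_data):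
--         if is_valid_sen(utt1, min_len, max_len) and is_valid_sen(utt2, min_len, max_len):
--             new_utt1.append(utt1)
--             new_utt2.append(utt2)
--             new_emo1.append(emo1)
--             new_emo2.append(emo2)
--             new_emo3.append(emo3)
--             new_person.append(person)
--     return new_utt1, new_utt2, new_emo1,new_emo2,new_emo3,new_person
-- ===== SOURCE B (Python) =====
-- def filter_sentence_length_peld(utt1_data, utt2_data, emo1_data, emo2_data, emo3_data, person_data, min_len, max_len):
--     # Stage 1: decide survival once, from the two utterance lists only.
--     n = min(len(utt1_data), len(utt2_data), len(emo1_data),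
--             len(emo2_data), len(emo3_data), len(person_data))
--     idx = [i for i in range(n)
--            if min_len < len(utt1_data[i]) <= max_len
--            and min_len < len(utt2_data[i]) <= max_len]
--     # Stage 2: gather each column independently by the surviving indices.
--     cols = []
--     for data in (utt1_data, utt2_data, emo1_data, emo2_data, emo3_data, person_data):
--         cols.append([data[i] for i in idx])
--     return tuple(cols)
-- ===== Notes on version B (the rewrite author's own statement) =====
-- stated objective: alternative
-- what changed: Replaces the single pass over zipped rows with six parallel appends by a two-stage index-mask design: first build the list of surviving indices from the two utterance lists alone, then gather each of the six columns independently by those indices.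
import Mathlib
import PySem

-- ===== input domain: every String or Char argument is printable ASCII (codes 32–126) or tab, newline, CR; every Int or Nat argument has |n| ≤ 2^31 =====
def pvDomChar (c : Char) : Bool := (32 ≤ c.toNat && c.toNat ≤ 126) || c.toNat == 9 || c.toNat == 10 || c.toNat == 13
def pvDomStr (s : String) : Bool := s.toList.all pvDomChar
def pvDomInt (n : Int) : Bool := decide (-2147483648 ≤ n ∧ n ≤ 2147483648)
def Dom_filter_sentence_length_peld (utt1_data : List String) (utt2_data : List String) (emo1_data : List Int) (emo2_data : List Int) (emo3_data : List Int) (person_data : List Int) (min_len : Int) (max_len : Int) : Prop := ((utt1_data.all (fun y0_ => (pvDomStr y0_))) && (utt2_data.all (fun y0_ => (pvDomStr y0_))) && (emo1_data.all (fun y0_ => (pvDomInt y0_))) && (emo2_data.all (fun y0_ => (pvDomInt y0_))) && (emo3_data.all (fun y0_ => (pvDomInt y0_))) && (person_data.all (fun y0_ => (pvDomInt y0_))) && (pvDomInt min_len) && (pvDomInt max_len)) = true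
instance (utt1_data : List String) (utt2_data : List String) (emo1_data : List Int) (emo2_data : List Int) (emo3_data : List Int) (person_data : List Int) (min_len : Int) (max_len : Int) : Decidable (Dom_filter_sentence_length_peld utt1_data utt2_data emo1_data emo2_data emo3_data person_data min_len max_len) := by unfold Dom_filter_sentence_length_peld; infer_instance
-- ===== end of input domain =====

-- B replaces A's single zipped-row pass with an index-mask decomposition (compute surviving
-- indices once, then gather each column); objective: alternative, same cost.

-- ===== PORT A =====
-- zip over the six lists (truncates at the shortest), as Python's zip does
def pvZip6 (a b : List String) (c d e f : List Int) : List (String × String × Int × Int × Int × Int) :=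
  match a, b, c, d, e, f with
  | x :: a, y :: b, z :: c, w :: d, v :: e, u :: f => (x, y, z, w, v, u) :: pvZip6 a b c d e f
  | _, _, _, _, _, _ => []

def pvIsValidSen (data : String) (min_len max_len : Int) : Bool :=
  if (PySem.Str.len data > min_len) && (PySem.Str.len data ≤ max_len) then true else false

def pvLoopA (rows : List (String × String × Int × Int × Int × Int)) (min_len max_len : Int)
    (a1 a2 : List String) (e1 e2 e3 p : List Int) :
    List String × List String × List Int × List Int × List Int × List Int :=
  match rows with
  | [] => (a1, a2, e1, e2, e3, p)
  | (u1, u2, m1, m2, m3, pr) :: rest =>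
    if pvIsValidSen u1 min_len max_len && pvIsValidSen u2 min_len max_len then
      pvLoopA rest min_len max_len (a1 ++ [u1]) (a2 ++ [u2]) (e1 ++ [m1]) (e2 ++ [m2]) (e3 ++ [m3]) (p ++ [pr])
    else
      pvLoopA rest min_len max_len a1 a2 e1 e2 e3 p

def filter_sentence_length_peld (utt1_data : List String) (utt2_data : List String) (emo1_data : List Int) (emo2_data : List Int) (emo3_data : List Int) (person_data : List Int) (min_len : Int) (max_len : Int) : List String × List String × List Int × List Int × List Int × List Int :=
  pvLoopA (pvZip6 utt1_data utt2_data emo1_data emo2_data emo3_data person_data) min_len max_len [] [] [] [] [] []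

-- ===== PORT B =====
-- survival test for index i, read off the two utterance lists only
-- (i is always < both lengths when used, so the 'none' arms are unreachable; Python would raise there)
def pvKeepIdx (u1 u2 : List String) (mn mx : Int) (i : Nat) : Bool :=
  match u1[i]?, u2[i]? with
  | some s1, some s2 =>
      (mn < PySem.Str.len s1 && PySem.Str.len s1 ≤ mx) &&
      (mn < PySem.Str.len s2 && PySem.Str.len s2 ≤ mx)
  | _, _ => false

-- [data[i] for i in idx]; every i is in range, Python would raise otherwise
def pvSelect {α : Type} (xs : List α) (idx : List Nat) : List α :=
  idx.filterMap (fun i => xs[i]?)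

def filter_sentence_length_peld_alt (utt1_data : List String) (utt2_data : List String) (emo1_data : List Int) (emo2_data : List Int) (emo3_data : List Int) (person_data : List Int) (min_len : Int) (max_len : Int) : List String × List String × List Int × List Int × List Int × List Int :=
  let n := min (min (min (min (min utt1_data.length utt2_data.length) emo1_data.length) emo2_data.length) emo3_data.length) person_data.length
  let idx := (List.range n).filter (pvKeepIdx utt1_data utt2_data min_len max_len)
  (pvSelect utt1_data idx, pvSelect utt2_data idx, pvSelect emo1_data idx,
   pvSelect emo2_data idx, pvSelect emo3_data idx, pvSelect person_data idx)

-- ===== PRECONDITION & SPEC =====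
def Spec_filter_sentence_length_peld (utt1_data : List String) (utt2_data : List String) (emo1_data : List Int) (emo2_data : List Int) (emo3_data : List Int) (person_data : List Int) (min_len : Int) (max_len : Int) (out : List String × List String × List Int × List Int × List Int × List Int) : Prop := out = filter_sentence_length_peld_alt utt1_data utt2_data emo1_data emo2_data emo3_data person_data min_len max_len
instance (utt1_data : List String) (utt2_data : List String) (emo1_data : List Int) (emo2_data : List Int) (emo3_data : List Int) (person_data : List Int) (min_len : Int) (max_len : Int) (out : List String × List String × List Int × List Int × List Int × List Int) : Decidable (Spec_filter_sentence_length_peld utt1_data utt2_data emo1_data emo2_data emo3_data person_data min_len max_len out) := by unfold Spec_filter_sentence_length_peld; infer_instance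

-- ===== CLAIM (what is proved, stated in full; the proofs are below) =====
def Claim_equal_filter_sentence_length_peld : Prop := ∀ (utt1_data : List String) (utt2_data : List String) (emo1_data : List Int) (emo2_data : List Int) (emo3_data : List Int) (person_data : List Int) (min_len : Int) (max_len : Int), Dom_filter_sentence_length_peld utt1_data utt2_data emo1_data emo2_data emo3_data person_data min_len max_len → Spec_filter_sentence_length_peld utt1_data utt2_data emo1_data emo2_data emo3_data person_data min_len max_len (filter_sentence_length_peld utt1_data utt2_data emo1_data emo2_data emo3_data person_data min_len max_len)

-- ===== LEMMAS AND PROOFS =====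
-- row-predicate that A's loop applies to each zipped row
def pvKeep (mn mx : Int) (row : String × String × Int × Int × Int × Int) : Bool :=
  (mn < PySem.Str.len row.1 && PySem.Str.len row.1 ≤ mx) &&
  (mn < PySem.Str.len row.2.1 && PySem.Str.len row.2.1 ≤ mx)

theorem pvLoopA_eq (rows : List (String × String × Int × Int × Int × Int)) (min_len max_len : Int)
    (a1 a2 : List String) (e1 e2 e3 p : List Int) :
    pvLoopA rows min_len max_len a1 a2 e1 e2 e3 p =
      (a1 ++ (rows.filter (pvKeep min_len max_len)).map (·.1),
       a2 ++ (rows.filter (pvKeep min_len max_len)).map (·.2.1),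
       e1 ++ (rows.filter (pvKeep min_len max_len)).map (·.2.2.1),
       e2 ++ (rows.filter (pvKeep min_len max_len)).map (·.2.2.2.1),
       e3 ++ (rows.filter (pvKeep min_len max_len)).map (·.2.2.2.2.1),
       p ++ (rows.filter (pvKeep min_len max_len)).map (·.2.2.2.2.2)) := by
  induction rows generalizing a1 a2 e1 e2 e3 p with
  | nil => simp [pvLoopA]
  | cons r rest ih =>
    obtain ⟨u1, u2, m1, m2, m3, pr⟩ := r
    have hk : (pvIsValidSen u1 min_len max_len && pvIsValidSen u2 min_len max_len)
        = pvKeep min_len max_len (u1, u2, m1, m2, m3, pr) := by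
      simp [pvIsValidSen, pvKeep]
    by_cases h : pvKeep min_len max_len (u1, u2, m1, m2, m3, pr) = true
    · simp [pvLoopA, hk, h, ih]
    · simp at h
      simp [pvLoopA, hk, h, ih]

theorem pvKeepIdx_succ (x y : String) (a b : List String) (mn mx : Int) (i : Nat) :
    pvKeepIdx (x :: a) (y :: b) mn mx (i + 1) = pvKeepIdx a b mn mx i := by
  simp [pvKeepIdx]

-- selecting from a cons list by a masked head index plus shifted indices
theorem pvSelect_cons_mask {α : Type} (x : α) (xs : List α) (k : Bool) (l : List Nat) :
    pvSelect (x :: xs) ((if k then [0] else []) ++ l.map Nat.succ)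
      = (if k then [x] else []) ++ pvSelect xs l := by
  cases k <;> simp [pvSelect, List.filterMap_map]

-- the core bridge: B's index-mask selection equals the maps of the filtered zip
set_option maxHeartbeats 1000000 in
theorem pvMask_eq (a b : List String) (c d e f : List Int) (mn mx : Int) :
    (pvSelect a ((List.range (min (min (min (min (min a.length b.length) c.length) d.length) e.length) f.length)).filter (pvKeepIdx a b mn mx)),
     pvSelect b ((List.range (min (min (min (min (min a.length b.length) c.length) d.length) e.length) f.length)).filter (pvKeepIdx a b mn mx)),
     pvSelect c ((List.range (min (min (min (min (min a.length b.length) c.length) d.length) e.length) f.length)).filter (pvKeepIdx a b mn mx)),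
     pvSelect d ((List.range (min (min (min (min (min a.length b.length) c.length) d.length) e.length) f.length)).filter (pvKeepIdx a b mn mx)),
     pvSelect e ((List.range (min (min (min (min (min a.length b.length) c.length) d.length) e.length) f.length)).filter (pvKeepIdx a b mn mx)),
     pvSelect f ((List.range (min (min (min (min (min a.length b.length) c.length) d.length) e.length) f.length)).filter (pvKeepIdx a b mn mx))) =
    (((pvZip6 a b c d e f).filter (pvKeep mn mx)).map (·.1),
     ((pvZip6 a b c d e f).filter (pvKeep mn mx)).map (·.2.1),
     ((pvZip6 a b c d e f).filter (pvKeep mn mx)).map (·.2.2.1),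
     ((pvZip6 a b c d e f).filter (pvKeep mn mx)).map (·.2.2.2.1),
     ((pvZip6 a b c d e f).filter (pvKeep mn mx)).map (·.2.2.2.2.1),
     ((pvZip6 a b c d e f).filter (pvKeep mn mx)).map (·.2.2.2.2.2)) := by
  induction a generalizing b c d e f with
  | nil => simp [pvZip6, pvSelect]
  | cons x a ih =>
    cases b with
    | nil => simp [pvZip6, pvSelect]
    | cons y b =>
      cases c with
      | nil => simp [pvZip6, pvSelect]
      | cons z c =>
        cases d with
        | nil => simp [pvZip6, pvSelect]
        | cons w d =>
          cases e with
          | nil => simp [pvZip6, pvSelect]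
          | cons v e =>
            cases f with
            | nil => simp [pvZip6, pvSelect]
            | cons u f =>
              have hn : min (min (min (min (min (x::a).length (y::b).length) (z::c).length) (w::d).length) (v::e).length) (u::f).length
                  = (min (min (min (min (min a.length b.length) c.length) d.length) e.length) f.length) + 1 := by
                simp [Nat.succ_min_succ]
              have hcomp : (pvKeepIdx (x::a) (y::b) mn mx) ∘ Nat.succ = pvKeepIdx a b mn mx := by
                funext i; exact pvKeepIdx_succ x y a b mn mx i
              have h0 : pvKeepIdx (x::a) (y::b) mn mx 0 = pvKeep mn mx (x, y, z, w, v, u) := by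
                simp [pvKeepIdx, pvKeep]
              have hfil : (List.range ((min (min (min (min (min a.length b.length) c.length) d.length) e.length) f.length) + 1)).filter (pvKeepIdx (x::a) (y::b) mn mx)
                  = (if pvKeep mn mx (x, y, z, w, v, u) then [0] else [])
                    ++ ((List.range (min (min (min (min (min a.length b.length) c.length) d.length) e.length) f.length)).filter (pvKeepIdx a b mn mx)).map Nat.succ := by
                rw [List.range_succ_eq_map, List.filter_cons, h0, List.filter_map, hcomp]
                by_cases hk : pvKeep mn mx (x, y, z, w, v, u) = true
                · simp [hk]
                · simp at hk; simp [hk]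
              have hih := ih b c d e f
              rw [Prod.mk.injEq, Prod.mk.injEq, Prod.mk.injEq, Prod.mk.injEq, Prod.mk.injEq] at hih
              obtain ⟨h1, h2, h3, h4, h5, h6⟩ := hih
              rw [hn, hfil, pvSelect_cons_mask, pvSelect_cons_mask, pvSelect_cons_mask,
                pvSelect_cons_mask, pvSelect_cons_mask, pvSelect_cons_mask]
              generalize hsel : (List.range (min (min (min (min (min a.length b.length) c.length) d.length) e.length) f.length)).filter (pvKeepIdx a b mn mx) = idxs at h1 h2 h3 h4 h5 h6 ⊢
              by_cases hk : pvKeep mn mx (x, y, z, w, v, u) = true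
              · simp [pvZip6, hk, h1, h2, h3, h4, h5, h6]
              · simp at hk
                simp [pvZip6, hk, h1, h2, h3, h4, h5, h6]

-- ===== VERDICT (by name: the statement is the Claim_ definition above) =====
theorem filter_sentence_length_peld_spec : Claim_equal_filter_sentence_length_peld := by
  intro u1 u2 e1 e2 e3 p mn mx _
  unfold Spec_filter_sentence_length_peld filter_sentence_length_peld filter_sentence_length_peld_alt
  rw [pvLoopA_eq]
  simpa using (pvMask_eq u1 u2 e1 e2 e3 p mn mx).symm
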